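-- pv_equiv track=rewrite | github.com/GONESIR/bioScriptNucleotideProject | bioScript/randomizedAlgorithm.py | findConsesus
-- ===== SOURCE A (Python) =====
-- def findConsesus(motifs):
--     consensus = ""
--     for i in range(len(motifs[0])):
--         baseCounts = {'A': 0, 'C': 0, 'G': 0, 'T': 0}
--         for motif in motifs:
--             baseCounts[motif[i]] += 1
--         consensusBase = max(baseCounts, key=baseCounts.get)
--         consensus += consensusBase
--     return consensus
-- ===== SOURCE B (Python) =====
-- def findConsesus(motifs):
--     L = len(motifs[0])
--     counts = [(0, 0, 0, 0)] * L
--     for motif in motifs: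
--         counts = [(a + (ch == 'A'), c + (ch == 'C'), g + (ch == 'G'), t + (ch == 'T'))
--                   for (a, c, g, t), ch in zip(counts, motif)]
--     return "".join('A' if a >= c and a >= g and a >= t else
--                    'C' if c >= g and c >= t else
--                    'G' if g >= t else 'T'
--                    for a, c, g, t in counts)
-- ===== Notes on version B (the rewrite author's own statement) =====
-- stated objective: alternative
-- what changed: B replaces A's column-major loop that rebuilds a fresh count dict and takes a keyed max inside every column by a row-major single build of a whole table of per-column (A,C,G,T) count tuples (folded over motifs via zip), followed by a separate selection pass with explicit tie-breaking comparisons instead of max(dict, key=dict.get).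
import Mathlib
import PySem

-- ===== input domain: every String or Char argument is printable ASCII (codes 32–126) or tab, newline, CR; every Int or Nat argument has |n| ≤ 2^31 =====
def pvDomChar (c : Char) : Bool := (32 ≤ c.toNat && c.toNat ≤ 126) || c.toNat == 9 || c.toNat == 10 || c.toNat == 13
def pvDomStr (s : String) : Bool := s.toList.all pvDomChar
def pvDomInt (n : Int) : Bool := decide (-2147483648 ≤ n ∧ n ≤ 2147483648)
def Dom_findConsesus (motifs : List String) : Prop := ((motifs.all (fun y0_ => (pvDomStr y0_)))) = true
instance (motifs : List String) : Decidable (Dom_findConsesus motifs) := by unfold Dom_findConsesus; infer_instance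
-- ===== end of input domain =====

-- B builds the whole table of per-column (A,C,G,T) count tuples in one row-major pass and then
-- selects each column's consensus base in a separate pass (alternative decomposition, same cost).

-- ===== PORT A =====
def findConsesus (motifs : List String) : String :=
  let first := (PySem.List.pyGet? motifs 0).getD ""   -- motifs[0]; none = IndexError, excluded by Pre_
  (PySem.List.pyRange 0 (PySem.Str.len first)).foldl (fun consensus i =>
    let baseCounts : PySem.Dict Char Int :=
      PySem.Dict.ofList [('A', 0), ('C', 0), ('G', 0), ('T', 0)]
    let baseCounts := motifs.foldl (fun d motif =>
      match PySem.Str.pyGet? motif i with       -- motif[i]; none = IndexError, excluded by Pre_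
      | some ch =>
        match d.get? ch with
        | some v => d.insert ch (v + 1)          -- baseCounts[motif[i]] += 1
        | none => d                              -- KeyError, excluded by Pre_
      | none => d) baseCounts
    -- max(baseCounts, key=baseCounts.get): first key of maximal value, in insertion order
    let consensusBase := (PySem.List.max? baseCounts.keys (fun k => baseCounts.getD k 0)).getD 'A'
    consensus.push consensusBase) ""

-- ===== PORT B =====
def pvBump (q : Int × Int × Int × Int) (ch : Char) : Int × Int × Int × Int :=
  (q.1 + (if ch = 'A' then 1 else 0), q.2.1 + (if ch = 'C' then 1 else 0),
   q.2.2.1 + (if ch = 'G' then 1 else 0), q.2.2.2 + (if ch = 'T' then 1 else 0))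

def pvPick (q : Int × Int × Int × Int) : Char :=
  if q.1 ≥ q.2.1 ∧ q.1 ≥ q.2.2.1 ∧ q.1 ≥ q.2.2.2 then 'A'
  else if q.2.1 ≥ q.2.2.1 ∧ q.2.1 ≥ q.2.2.2 then 'C'
  else if q.2.2.1 ≥ q.2.2.2 then 'G' else 'T'

def findConsesus_alt (motifs : List String) : String :=
  let L := (PySem.Str.len ((PySem.List.pyGet? motifs 0).getD "")).toNat   -- len(motifs[0])
  let counts := motifs.foldl
    (fun cs m => (cs.zip m.toList).map (fun p => pvBump p.1 p.2))
    (List.replicate L ((0 : Int), (0 : Int), (0 : Int), (0 : Int)))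
  String.ofList (counts.map pvPick)

-- ===== PRECONDITION & SPEC =====
-- Pre_ excludes exactly the inputs where A raises: the empty list (IndexError on motifs[0]),
-- a motif shorter than motifs[0] (IndexError on motif[i]), and a non-ACGT character in the
-- first len(motifs[0]) positions of some motif (KeyError).
def Pre_findConsesus (motifs : List String) : Prop :=
  motifs ≠ [] ∧ ∀ m ∈ motifs,
    (motifs.headD "").toList.length ≤ m.toList.length ∧
    ((m.toList.take (motifs.headD "").toList.length).all
      (fun ch => ch == 'A' || ch == 'C' || ch == 'G' || ch == 'T')) = true
instance (motifs : List String) : Decidable (Pre_findConsesus motifs) := by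
  unfold Pre_findConsesus; infer_instance

def pvWitness_findConsesus : List String := ["ACG", "ATG", "GTG"]

def Spec_findConsesus (motifs : List String) (out : String) : Prop := out = findConsesus_alt motifs
instance (motifs : List String) (out : String) : Decidable (Spec_findConsesus motifs out) := by
  unfold Spec_findConsesus; infer_instance

-- ===== CLAIM (what is proved, stated in full; the proofs are below) =====
def Claim_equal_findConsesus : Prop := ∀ (motifs : List String), Dom_findConsesus motifs → Pre_findConsesus motifs → Spec_findConsesus motifs (findConsesus motifs)

-- ===== LEMMAS AND PROOFS =====

-- the count dict A maintains always has this exact shape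
def pvQuadDict (q : Int × Int × Int × Int) : PySem.Dict Char Int :=
  ⟨[('A', q.1), ('C', q.2.1), ('G', q.2.2.1), ('T', q.2.2.2)]⟩

-- A's per-column character, as A computes it
def pvColChar (motifs : List String) (i : Int) : Char :=
  let baseCounts : PySem.Dict Char Int :=
    PySem.Dict.ofList [('A', 0), ('C', 0), ('G', 0), ('T', 0)]
  let baseCounts := motifs.foldl (fun d motif =>
    match PySem.Str.pyGet? motif i with
    | some ch =>
      match d.get? ch with
      | some v => d.insert ch (v + 1)
      | none => d
    | none => d) baseCounts
  (PySem.List.max? baseCounts.keys (fun k => baseCounts.getD k 0)).getD 'A'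

theorem pvA_body (motifs : List String) :
    findConsesus motifs =
      (PySem.List.pyRange 0 (PySem.Str.len ((PySem.List.pyGet? motifs 0).getD ""))).foldl
        (fun s i => s.push (pvColChar motifs i)) "" := rfl

theorem pvQuadDict_init :
    (PySem.Dict.ofList [('A', (0:Int)), ('C', 0), ('G', 0), ('T', 0)]) = pvQuadDict (0, 0, 0, 0) := by
  rfl

theorem pvQuadDict_step (q : Int × Int × Int × Int) (ch : Char)
    (h : ch = 'A' ∨ ch = 'C' ∨ ch = 'G' ∨ ch = 'T') :
    (match (pvQuadDict q).get? ch with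
     | some v => (pvQuadDict q).insert ch (v + 1)
     | none => pvQuadDict q) = pvQuadDict (pvBump q ch) := by
  rcases h with h | h | h | h <;> subst h <;>
    simp [pvQuadDict, pvBump, PySem.Dict.get?, PySem.Dict.insert, PySem.Dict.contains,
      List.find?, List.any]

theorem pvQuadDict_max (q : Int × Int × Int × Int) :
    (PySem.List.max? (pvQuadDict q).keys (fun k => (pvQuadDict q).getD k 0)).getD 'A' = pvPick q := by
  have hA : (pvQuadDict q).getD 'A' 0 = q.1 := rfl
  have hC : (pvQuadDict q).getD 'C' 0 = q.2.1 := rfl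
  have hG : (pvQuadDict q).getD 'G' 0 = q.2.2.1 := rfl
  have hT : (pvQuadDict q).getD 'T' 0 = q.2.2.2 := rfl
  rw [show (pvQuadDict q).keys = ['A', 'C', 'G', 'T'] from rfl]
  simp only [PySem.List.max?, List.foldl_cons, List.foldl_nil, hA, hC, hG, hT]
  rcases lt_or_ge q.1 q.2.1 with h1 | h1
  · rw [if_pos h1]
    simp only [hC]
    rcases lt_or_ge q.2.1 q.2.2.1 with h2 | h2
    · rw [if_pos h2]
      simp only [hG]
      rcases lt_or_ge q.2.2.1 q.2.2.2 with h3 | h3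
      · rw [if_pos h3]
        simp only [Option.getD_some, pvPick]; split_ifs <;> first | rfl | omega
      · rw [if_neg (not_lt.mpr h3)]
        simp only [Option.getD_some, pvPick]; split_ifs <;> first | rfl | omega
    · rw [if_neg (not_lt.mpr h2)]
      simp only [hC]
      rcases lt_or_ge q.2.1 q.2.2.2 with h3 | h3
      · rw [if_pos h3]
        simp only [Option.getD_some, pvPick]; split_ifs <;> first | rfl | omega
      · rw [if_neg (not_lt.mpr h3)]
        simp only [Option.getD_some, pvPick]; split_ifs <;> first | rfl | omega
  · rw [if_neg (not_lt.mpr h1)]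
    simp only [hA]
    rcases lt_or_ge q.1 q.2.2.1 with h2 | h2
    · rw [if_pos h2]
      simp only [hG]
      rcases lt_or_ge q.2.2.1 q.2.2.2 with h3 | h3
      · rw [if_pos h3]
        simp only [Option.getD_some, pvPick]; split_ifs <;> first | rfl | omega
      · rw [if_neg (not_lt.mpr h3)]
        simp only [Option.getD_some, pvPick]; split_ifs <;> first | rfl | omega
    · rw [if_neg (not_lt.mpr h2)]
      simp only [hA]
      rcases lt_or_ge q.1 q.2.2.2 with h3 | h3
      · rw [if_pos h3]
        simp only [Option.getD_some, pvPick]; split_ifs <;> first | rfl | omega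
      · rw [if_neg (not_lt.mpr h3)]
        simp only [Option.getD_some, pvPick]; split_ifs <;> first | rfl | omega

-- A's inner loop over motifs, at a fixed column i, is the column count fold
theorem pvA_col (motifs : List String) (i : Nat) (q : Int × Int × Int × Int)
    (h : ∀ m ∈ motifs, i < m.toList.length ∧
      (m.toList.getD i 'A' = 'A' ∨ m.toList.getD i 'A' = 'C' ∨
       m.toList.getD i 'A' = 'G' ∨ m.toList.getD i 'A' = 'T')) :
    motifs.foldl (fun d motif =>
      match PySem.Str.pyGet? motif (i : Int) with
      | some ch =>
        match d.get? ch with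
        | some v => d.insert ch (v + 1)
        | none => d
      | none => d) (pvQuadDict q)
    = pvQuadDict (motifs.foldl (fun q m => pvBump q (m.toList.getD i 'A')) q) := by
  induction motifs generalizing q with
  | nil => rfl
  | cons m ms ih =>
    obtain ⟨hlen, hch⟩ := h m List.mem_cons_self
    have hget : PySem.Str.pyGet? m (i : Int) = some (m.toList.getD i 'A') := by
      rw [PySem.Str.pyGet?_natCast, List.getElem?_eq_getElem hlen, List.getD_eq_getElem _ _ hlen]
    simp only [List.foldl_cons, hget]
    rw [pvQuadDict_step q _ hch]
    exact ih _ (fun m hm => h m (List.mem_cons_of_mem _ hm))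

-- A's outer loop builds the string of the per-column characters
theorem pvA_shape (l : List Int) (g : Int → Char) (cs : List Char) :
    l.foldl (fun s i => s.push (g i)) (String.ofList cs) = String.ofList (cs ++ l.map g) := by
  induction l generalizing cs with
  | nil => simp
  | cons i l ih =>
    have hp : (String.ofList cs).push (g i) = String.ofList (cs ++ [g i]) := by
      apply String.toList_inj.mp; simp
    simp only [List.foldl_cons, hp, ih, List.map_cons]
    simp

-- one row step of B's table fold, pointwise
theorem pvB_step (m : List Char) (L : Nat) (f : Nat → Int × Int × Int × Int)
    (h : L ≤ m.length) :
    ((((List.range L).map f).zip m).map (fun p => pvBump p.1 p.2))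
      = (List.range L).map (fun i => pvBump (f i) (m.getD i 'A')) := by
  apply List.ext_getElem
  · simp [Nat.min_eq_left h]
  · intro i h1 h2
    simp only [List.length_map, List.length_zip, List.length_range] at h1
    have hi : i < L := lt_of_lt_of_le h1 (min_le_left _ _)
    have him : i < m.length := lt_of_lt_of_le hi h
    simp [List.getElem_zip, List.getD, List.getElem?_eq_getElem him]

-- B's table fold computes every column fold at once
theorem pvB_fold (motifs : List String) (L : Nat) (f : Nat → Int × Int × Int × Int)
    (h : ∀ m ∈ motifs, L ≤ m.toList.length) :
    motifs.foldl (fun cs m => (cs.zip m.toList).map (fun p => pvBump p.1 p.2))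
      ((List.range L).map f)
      = (List.range L).map (fun i =>
          motifs.foldl (fun q m => pvBump q (m.toList.getD i 'A')) (f i)) := by
  induction motifs generalizing f with
  | nil => rfl
  | cons m ms ih =>
    simp only [List.foldl_cons]
    rw [pvB_step m.toList L f (h m List.mem_cons_self)]
    exact ih _ (fun m hm => h m (List.mem_cons_of_mem _ hm))

-- ===== VERDICT (by name: the statement is the Claim_ definition above) =====
theorem findConsesus_spec : Claim_equal_findConsesus := by
  intro motifs _ hPre
  obtain ⟨hne, hall⟩ := hPre
  obtain ⟨m0, ms, rfl⟩ : ∃ m0 ms, motifs = m0 :: ms := by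
    cases motifs with
    | nil => exact absurd rfl hne
    | cons a l => exact ⟨a, l, rfl⟩
  have hhead : ((m0 :: ms).headD "") = m0 := rfl
  rw [hhead] at hall
  set L := m0.toList.length with hLdef
  have hlenall : ∀ m ∈ m0 :: ms, L ≤ m.toList.length := fun m hm => (hall m hm).1
  have hchar : ∀ m ∈ m0 :: ms, ∀ i, i < L →
      (m.toList.getD i 'A' = 'A' ∨ m.toList.getD i 'A' = 'C' ∨
       m.toList.getD i 'A' = 'G' ∨ m.toList.getD i 'A' = 'T') := by
    intro m hm i hi
    have him : i < m.toList.length := lt_of_lt_of_le hi (hlenall m hm)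
    have hmem : m.toList.getD i 'A' ∈ m.toList.take L := by
      rw [List.getD_eq_getElem _ _ him]
      have h2 : i < (m.toList.take L).length := by
        rw [List.length_take]; omega
      have := List.getElem_take (xs := m.toList) (i := i) (h := h2)
      rw [← this]
      exact List.getElem_mem h2
    have hb := List.all_eq_true.mp (hall m hm).2 _ hmem
    simp only [Bool.or_eq_true, beq_iff_eq] at hb
    tauto
  have hget0 : PySem.List.pyGet? (m0 :: ms) (0 : Int) = some m0 := by
    simp [PySem.List.pyGet?, PySem.List.pyIdx?]
  have hlen0 : PySem.Str.len m0 = (L : Int) := by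
    simp [PySem.Str.len_eq, hLdef]
  -- the common per-column count fold
  have hcolchar : ∀ i : Nat, i < L → pvColChar (m0 :: ms) (i : Int) =
      pvPick ((m0 :: ms).foldl (fun q m => pvBump q (m.toList.getD i 'A')) (0, 0, 0, 0)) := by
    intro i hi
    simp only [pvColChar]
    rw [pvQuadDict_init,
      pvA_col (m0 :: ms) i _ (fun m hm => ⟨lt_of_lt_of_le hi (hlenall m hm), hchar m hm i hi⟩),
      pvQuadDict_max]
  -- A side
  unfold Spec_findConsesus
  rw [pvA_body, hget0]
  simp only [Option.getD_some]
  rw [hlen0, PySem.List.pyRange_zero_natCast L]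
  have hempty : ("" : String) = String.ofList [] := rfl
  rw [hempty, pvA_shape]
  -- B side
  unfold findConsesus_alt
  rw [hget0]
  simp only [Option.getD_some]
  rw [hlen0]
  simp only [Int.toNat_natCast]
  have hrep : List.replicate L ((0 : Int), (0 : Int), (0 : Int), (0 : Int))
      = (List.range L).map (fun _ => ((0 : Int), (0 : Int), (0 : Int), (0 : Int))) := by
    simp
  rw [hrep, pvB_fold (m0 :: ms) L _ hlenall]
  -- both sides are the string of the per-column picks
  rw [List.map_map, List.map_map]
  congr 1
  refine List.map_congr_left (fun i hi => ?_)
  rw [List.mem_range] at hi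
  exact hcolchar i hi
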